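-- pv_equiv track=rewrite | github.com/TheFenix2000/pp1 | 05-Test1/kolos/p3.py | f
-- ===== SOURCE A (Python) =====
-- def f(detector):
--     people = 0
--     maxPeople = 0
--     last = False
--     for i in detector:
--         if i == "+":
--             people+=1
--             maxPeople+=1
--             last = True
--         else:
--             people-=1
--             last = False
--         if last:
--             maxPeople+=1
--         else:
--             maxPeople=0
--         if maxPeople >=3:
--             return True
--     return False
-- ===== SOURCE B (Python) =====
-- def f(detector):
--     return any(a == "+" and b == "+" for a, b in zip(detector, detector[1:]))
-- ===== Notes on version B (the rewrite author's own statement) =====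
-- stated objective: simpler
-- what changed: Replaced the people/maxPeople/last counter state machine by a one-line adjacent-pair scan: A returns True exactly when some element equals the plus sign and its immediate successor does too, so B zips the sequence with its own tail and checks whether any such pair exists.
import Mathlib
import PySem

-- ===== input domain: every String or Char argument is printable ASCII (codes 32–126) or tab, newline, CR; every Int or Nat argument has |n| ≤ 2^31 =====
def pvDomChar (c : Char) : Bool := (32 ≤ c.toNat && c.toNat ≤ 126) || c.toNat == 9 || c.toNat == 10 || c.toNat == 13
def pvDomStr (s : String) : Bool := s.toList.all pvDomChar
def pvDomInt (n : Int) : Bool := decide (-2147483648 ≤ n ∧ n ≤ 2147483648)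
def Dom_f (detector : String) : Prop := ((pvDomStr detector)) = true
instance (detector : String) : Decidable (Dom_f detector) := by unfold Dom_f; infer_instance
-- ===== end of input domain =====

-- B replaces A's people/maxPeople/last counter state machine by a direct adjacent-pair scan (simpler).


-- ===== PORT A =====
-- the for-loop with early return, carrying (people, maxPeople, last)
def fLoop : List Char → Int → Int → Bool → Bool
  | [], _, _, _ => false
  | i :: rest, people, maxPeople, _last =>
    let st : Int × Int × Bool :=
      if i = '+' then (people + 1, maxPeople + 1, true) else (people - 1, maxPeople, false)
    let people := st.1
    let maxPeople := st.2.1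
    let last := st.2.2
    let maxPeople := if last then maxPeople + 1 else 0
    if maxPeople ≥ 3 then true else fLoop rest people maxPeople last

def f (detector : String) : Bool := fLoop detector.toList 0 0 false

-- ===== PORT B =====
-- any(a == "+" and b == "+" for a, b in zip(detector, detector[1:]))
def f_alt (detector : String) : Bool :=
  ((detector.toList.zip (detector.toList.drop 1)).any (fun ab => ab.1 = '+' && ab.2 = '+'))

-- ===== PRECONDITION & SPEC =====
def Spec_f (detector : String) (out : Bool) : Prop := out = f_alt detector
instance (detector : String) (out : Bool) : Decidable (Spec_f detector out) := by unfold Spec_f; infer_instance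

-- ===== CLAIM (what is proved, stated in full; the proofs are below) =====
def Claim_equal_f : Prop := ∀ (detector : String), Dom_f detector → Spec_f detector (f detector)

-- ===== LEMMAS AND PROOFS =====

-- B's scan over a char list
def pairAny (l : List Char) : Bool := (l.zip (l.drop 1)).any (fun ab => ab.1 = '+' && ab.2 = '+')

theorem pairAny_single (a : Char) : pairAny [a] = false := rfl
theorem pairAny_cons (a b : Char) (r : List Char) :
    pairAny (a :: b :: r) = ((a = '+' && b = '+') || pairAny (b :: r)) := by
  simp [pairAny]

-- after a non-'+' char, pairAny of the tail suffices
theorem pairAny_cons_ne (a : Char) (t : List Char) (h : a ≠ '+') :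
    pairAny (a :: t) = pairAny t := by
  cases t with
  | nil => rfl
  | cons b r => simp [pairAny_cons, h]

-- "the previous char was '+'": true iff head is '+' or a later adjacent pair exists
def gB (l : List Char) : Bool :=
  match l with
  | [] => false
  | a :: t => (a = '+') || pairAny (a :: t)

theorem fLoop_inv (l : List Char) : ∀ (p : Int) (last : Bool),
    fLoop l p 0 last = pairAny l ∧ ∀ m : Int, 1 ≤ m → fLoop l p m last = gB l := by
  induction l with
  | nil => intro p last; exact ⟨rfl, fun m _ => rfl⟩
  | cons a t ih =>
    intro p last
    constructor
    · by_cases ha : a = '+'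
      · have h2 : (1:Int) ≤ 2 := by norm_num
        have := (ih (p + 1) true).2 2 h2
        simp [fLoop, ha, this]
        cases t with
        | nil => simp [gB, pairAny_single]
        | cons b r => simp [gB, pairAny_cons]
      · have := (ih (p - 1) false).1
        simp [fLoop, ha, this, pairAny_cons_ne a t ha]
    · intro m hm
      by_cases ha : a = '+'
      · have h3 : (3:Int) ≤ m + 1 + 1 := by omega
        simp [fLoop, ha, h3, gB]
      · have := (ih (p - 1) false).1
        simp [fLoop, ha, this, gB, pairAny_cons_ne a t ha]

-- ===== VERDICT (by name: the statement is the Claim_ definition above) =====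
theorem f_spec : Claim_equal_f := by
  intro d _
  show f d = f_alt d
  have := (fLoop_inv d.toList 0 false).1
  simpa [f, f_alt, pairAny] using this
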